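-- pv_equiv track=rewrite | github.com/Jaspershz/Modified-connect-four-with-AI-using-minimax-and-pruning-methods | agents.py | get_line_score
-- ===== SOURCE A (Python) =====
-- def get_line_score(lines):
--     score = 0
--     for i in lines:
--         p1_count = i.count(1)
--         p2_count = i.count(-1)
--         if p1_count<2 and p2_count<2:
--             continue
--         else:
--             combos = []
--             combo = 0
--             j = 1
--             while j < len(i):
--                 if i[j] == i[j-1] and j == len(i)-1:
--                     combo += 2
--                     combos.append([i[j], combo])
--                     break
--                 elif i[j] == i[j-1]:
--                     combo += 1
--                 else:
--                     combo += 1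
--                     combos.append([i[j-1], combo])
--                     combo = 0
--                 j += 1
--
--             for j in combos:
--                 if j[1] >= 3:
--                     score += j[0] * (j[1] ** 2)
--     return score
-- ===== SOURCE B (Python) =====
-- def get_line_score(lines):
--     score = 0
--     for row in lines:
--         if row.count(1) < 2 and row.count(-1) < 2:
--             continue
--         n = len(row)
--         cuts = [0] + [k for k in range(1, n) if row[k] != row[k - 1]] + [n]
--         for a, b in zip(cuts, cuts[1:]):
--             if b - a >= 3:
--                 score += row[a] * (b - a) ** 2
--     return score
-- ===== Notes on version B (the rewrite author's own statement) =====
-- stated objective: alternative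
-- what changed: Replaces A's stateful index/combo while-scan that builds a combos list plus a second scoring loop by a boundary-index method: it builds the list of cut positions where adjacent cells differ and scores each segment directly from consecutive cut pairs via zip, with no run counter or run-length state.
import Mathlib
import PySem

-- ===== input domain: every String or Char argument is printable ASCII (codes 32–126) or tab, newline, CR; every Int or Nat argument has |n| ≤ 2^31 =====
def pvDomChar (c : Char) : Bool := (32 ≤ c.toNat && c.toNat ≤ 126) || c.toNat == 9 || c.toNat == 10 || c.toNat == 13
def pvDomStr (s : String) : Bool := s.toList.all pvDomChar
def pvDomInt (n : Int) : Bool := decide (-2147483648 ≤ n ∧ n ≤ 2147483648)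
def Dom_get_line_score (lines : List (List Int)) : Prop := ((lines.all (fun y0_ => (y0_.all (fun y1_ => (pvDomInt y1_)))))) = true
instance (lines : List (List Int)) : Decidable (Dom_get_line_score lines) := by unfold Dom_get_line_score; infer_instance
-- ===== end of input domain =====

-- B replaces A's index/combo run-scan (combos list + second scoring loop) by a boundary-index
-- method: cut positions where adjacent cells differ, segments scored from consecutive cut pairs.


-- ===== PORT A =====
-- the while j < len(i) loop; state (j, combo, combos). Indices j and j-1 are always in
-- range (j starts at 1), so List.getD is exact for Python's i[j] / i[j-1] here.
def aLoop (i : List Int) (j : Nat) (combo : Int) (combos : List (Int × Int)) : List (Int × Int) :=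
  if _h : j < i.length then
    if i.getD j 0 = i.getD (j-1) 0 ∧ j = i.length - 1 then
      combos ++ [(i.getD j 0, combo + 2)]            -- combo += 2; append; break
    else if i.getD j 0 = i.getD (j-1) 0 then
      aLoop i (j+1) (combo+1) combos                  -- combo += 1
    else
      aLoop i (j+1) 0 (combos ++ [(i.getD (j-1) 0, combo+1)])  -- combo += 1; append; combo = 0
  else combos
termination_by i.length - j

def get_line_score (lines : List (List Int)) : Int :=
  lines.foldl (fun score i =>
    if PySem.List.count i 1 < 2 ∧ PySem.List.count i (-1) < 2 then score
    else
      let combos := aLoop i 1 0 []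
      combos.foldl (fun s j => if j.2 ≥ 3 then s + j.1 * j.2 ^ 2 else s) score) 0

-- ===== PORT B =====
-- cuts = [0] + [k for k in range(1, n) if row[k] != row[k-1]] + [n]; all indices used
-- (k, k-1, a) are always in range, so pyGetD _ _ 0 is exact for Python's row[·] here.
def get_line_score_alt (lines : List (List Int)) : Int :=
  lines.foldl (fun score row =>
    if PySem.List.count row 1 < 2 ∧ PySem.List.count row (-1) < 2 then score
    else
      let n : Int := row.length
      let cuts : List Int := [0] ++ (PySem.List.pyRange 1 n 1).filter
          (fun k => PySem.List.pyGetD row k 0 ≠ PySem.List.pyGetD row (k-1) 0) ++ [n]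
      (cuts.zip (PySem.List.slice cuts (some 1) none)).foldl
        (fun s ab => if ab.2 - ab.1 ≥ 3 then s + PySem.List.pyGetD row ab.1 0 * (ab.2 - ab.1) ^ 2 else s) score) 0

-- ===== PRECONDITION & SPEC =====
def Spec_get_line_score (lines : List (List Int)) (out : Int) : Prop := out = get_line_score_alt lines
instance (lines : List (List Int)) (out : Int) : Decidable (Spec_get_line_score lines out) := by unfold Spec_get_line_score; infer_instance

-- ===== CLAIM (what is proved, stated in full; the proofs are below) =====
def Claim_equal_get_line_score : Prop := ∀ (lines : List (List Int)), Dom_get_line_score lines → Spec_get_line_score lines (get_line_score lines)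

-- ===== LEMMAS AND PROOFS =====

-- score of one run entry
def sc (v c : Int) : Int := if c ≥ 3 then v * c ^ 2 else 0

-- structural version of A's while loop
def combosS (prev : Int) (combo : Int) : List Int → List (Int × Int)
  | [] => []
  | [x] => if x = prev then [(x, combo + 2)] else [(prev, combo + 1)]
  | x :: y :: r =>
      if x = prev then combosS x (combo + 1) (y :: r)
      else (prev, combo + 1) :: combosS x 0 (y :: r)

def S : List (Int × Int) → Int
  | [] => 0
  | p :: r => sc p.1 p.2 + S r

lemma combosS_single (prev combo x : Int) :
    combosS prev combo [x] = if x = prev then [(x, combo + 2)] else [(prev, combo + 1)] := rfl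

lemma combosS_cons2 (prev combo x y : Int) (r : List Int) :
    combosS prev combo (x :: y :: r) =
      if x = prev then combosS x (combo + 1) (y :: r)
      else (prev, combo + 1) :: combosS x 0 (y :: r) := rfl

-- common reference: score of the remaining cells, given the current run (value v, length n)
def SB (v n : Int) : List Int → Int
  | [] => sc v n
  | x :: r => if n ≠ 0 ∧ x = v then SB v (n + 1) r else sc v n + SB x 1 r

lemma foldl_score_eq (combos : List (Int × Int)) (s : Int) :
    combos.foldl (fun s j => if j.2 ≥ 3 then s + j.1 * j.2 ^ 2 else s) s = s + S combos := by
  induction combos generalizing s with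
  | nil => simp [S]
  | cons p r ih =>
      simp only [List.foldl_cons, S, ih, sc]
      split_ifs <;> ring

lemma aLoop_bridge (rest : List Int) : ∀ (i : List Int) (j : Nat) (combo : Int)
    (combos : List (Int × Int)), 1 ≤ j → i.drop j = rest →
    aLoop i j combo combos = combos ++ combosS (i.getD (j-1) 0) combo rest := by
  induction rest with
  | nil =>
      intro i j combo combos hj hd
      have hlen : i.length ≤ j := by
        have := congrArg List.length hd; simp at this; omega
      rw [aLoop]
      simp [combosS, Nat.not_lt.mpr hlen]
  | cons x r ih =>
      intro i j combo combos hj hd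
      have hlt : j < i.length := by
        have := congrArg List.length hd; simp at this; omega
      have hx : i.getD j 0 = x := by
        have h0 : (i.drop j).getD 0 0 = x := by rw [hd]; rfl
        rw [List.getD_eq_getElem?_getD] at h0 ⊢
        rwa [List.getElem?_drop, Nat.add_zero] at h0
      have hdr : i.drop (j+1) = r := by
        have ht : (i.drop j).tail = r := by rw [hd]; rfl
        rwa [List.tail_drop] at ht
      have hlen : i.length = j + 1 + r.length := by
        have := congrArg List.length hd; simp at this; omega
      rw [aLoop]
      cases r with
      | nil =>
          simp only [List.length_nil] at hlen
          have hjl : j = i.length - 1 := by omega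
          by_cases heq : i.getD j 0 = i.getD (j-1) 0
          · have hxp : x = i.getD (j-1) 0 := by rw [← hx]; exact heq
            rw [dif_pos hlt, if_pos ⟨heq, hjl⟩, hx, combosS_single, if_pos hxp]
          · have hxp : ¬ x = i.getD (j-1) 0 := by rw [← hx]; exact heq
            have hend : ¬ j + 1 < i.length := by omega
            rw [dif_pos hlt, if_neg (by tauto), if_neg heq, aLoop, dif_neg hend,
              combosS_single, if_neg hxp]
      | cons y r' =>
          simp only [List.length_cons] at hlen
          have hjl : ¬ j = i.length - 1 := by omega
          by_cases he : i.getD j 0 = i.getD (j-1) 0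
          · have hxp : x = i.getD (j-1) 0 := by rw [← hx]; exact he
            rw [dif_pos hlt, if_neg (by tauto), if_pos he,
              ih i (j+1) (combo+1) combos (by omega) hdr,
              Nat.add_sub_cancel, hx, combosS_cons2, if_pos hxp]
          · have hxp : ¬ x = i.getD (j-1) 0 := by rw [← hx]; exact he
            rw [dif_pos hlt, if_neg (by tauto), if_neg he,
              ih i (j+1) 0 (combos ++ [(i.getD (j-1) 0, combo+1)]) (by omega) hdr,
              Nat.add_sub_cancel, hx, combosS_cons2, if_neg hxp, List.append_assoc]
            rfl

lemma S_combosS_eq_SB (rest : List Int) : ∀ (prev combo : Int), 0 ≤ combo → rest ≠ [] →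
    S (combosS prev combo rest) = SB prev (combo + 1) rest := by
  induction rest with
  | nil => intro _ _ _ h; exact absurd rfl h
  | cons x r ih =>
      intro prev combo hc _
      cases r with
      | nil =>
          by_cases hx : x = prev
          · simp [combosS, SB, hx, S, sc, show combo + 1 ≠ 0 by omega]
            ring_nf
          · simp [combosS, SB, hx, S, sc, show ¬ (1:Int) ≥ 3 by omega]
      | cons y r' =>
          by_cases hx : x = prev
          · rw [combosS, if_pos hx, SB, if_pos ⟨by omega, hx⟩,
              ih x (combo + 1) (by omega) (by simp), hx]
          · rw [combosS, if_neg hx, SB, if_neg (by tauto), S,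
              ih x 0 le_rfl (by simp)]
            rfl

-- B-side: the fold over zip(cuts, cuts[1:])
def fp (row : List Int) (cs : List Int) (s : Int) : Int :=
  (cs.zip cs.tail).foldl
    (fun s ab => if ab.2 - ab.1 ≥ 3 then s + PySem.List.pyGetD row ab.1 0 * (ab.2 - ab.1) ^ 2 else s) s

lemma fp_cons2 (row : List Int) (a b : Int) (t : List Int) (s : Int) :
    fp row (a :: b :: t) s =
      fp row (b :: t) (if b - a ≥ 3 then s + PySem.List.pyGetD row a 0 * (b - a) ^ 2 else s) := rfl

lemma fp_pair (row : List Int) (a b s : Int) :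
    fp row [a, b] s = if b - a ≥ 3 then s + PySem.List.pyGetD row a 0 * (b - a) ^ 2 else s := rfl

-- Bridge: the zip-of-cuts fold from position j, with run start st, equals SB on the suffix.
lemma cuts_bridge (rest : List Int) : ∀ (i : List Int) (j : Nat) (st s : Int),
    1 ≤ j → j ≤ i.length → i.drop j = rest → 0 ≤ st → st < (j : Int) →
    PySem.List.pyGetD i ((j : Int) - 1) 0 = PySem.List.pyGetD i st 0 →
    fp i (st :: ((PySem.List.pyRange (j : Int) (i.length : Int) 1).filter
        (fun k => PySem.List.pyGetD i k 0 ≠ PySem.List.pyGetD i (k-1) 0) ++ [(i.length : Int)])) s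
    = s + SB (PySem.List.pyGetD i st 0) ((j : Int) - st) rest := by
  induction rest with
  | nil =>
      intro i j st s hj hjle hd hst hstj hprev
      have hlen : i.length ≤ j := by
        have := congrArg List.length hd; simp at this; omega
      have hjn : (j : Int) = (i.length : Int) := by omega
      rw [PySem.List.pyRange_one_eq_nil (by omega)]
      simp only [List.filter_nil, List.nil_append, fp_pair, SB, sc, hjn]
      split_ifs <;> ring
  | cons x r ih =>
      intro i j st s hj hjle hd hst hstj hprev
      have hlt : j < i.length := by
        have := congrArg List.length hd; simp at this; omega
      have hx : PySem.List.pyGetD i (j : Int) 0 = x := by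
        rw [PySem.List.pyGetD_natCast]
        have h0 : (i.drop j).getD 0 0 = x := by rw [hd]; rfl
        rw [List.getD_eq_getElem?_getD] at h0 ⊢
        rwa [List.getElem?_drop, Nat.add_zero] at h0
      have hdr : i.drop (j+1) = r := by
        have ht : (i.drop j).tail = r := by rw [hd]; rfl
        rwa [List.tail_drop] at ht
      rw [PySem.List.pyRange_one_cons (by omega)]
      by_cases he : x = PySem.List.pyGetD i st 0
      · -- same run continues: j is not a cut
        have hfil : ¬ (PySem.List.pyGetD i (j : Int) 0 ≠ PySem.List.pyGetD i ((j : Int) - 1) 0) := by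
          rw [hx, hprev, he]; simp
        rw [List.filter_cons_of_neg (by simpa using hfil)]
        have hSB : SB (PySem.List.pyGetD i st 0) ((j : Int) - st) (x :: r)
            = SB (PySem.List.pyGetD i st 0) (((j : Int) - st) + 1) r := by
          rw [SB, if_pos ⟨by omega, he⟩]
        have hih := ih i (j+1) st s (by omega) (by omega) hdr hst (by push_cast; omega)
          (by push_cast; rw [add_sub_cancel_right, hx, he])
        push_cast at hih
        have h1 : ((j : Int) + 1 - st) = ((j : Int) - st) + 1 := by ring
        rw [hih, h1, hSB]
      · -- run breaks: j is a cut
        have hfil : PySem.List.pyGetD i (j : Int) 0 ≠ PySem.List.pyGetD i ((j : Int) - 1) 0 := by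
          rw [hx, hprev]; exact he
        rw [List.filter_cons_of_pos (by simpa using hfil)]
        simp only [List.cons_append, fp_cons2]
        have hih := ih i (j+1) (j : Int)
          (if (j : Int) - st ≥ 3 then s + PySem.List.pyGetD i st 0 * ((j : Int) - st) ^ 2 else s)
          (by omega) (by omega) hdr (by omega) (by push_cast; omega)
          (by push_cast; rw [add_sub_cancel_right])
        push_cast at hih
        have h2 : ((j : Int) + 1 - (j : Int)) = 1 := by ring
        rw [h2] at hih
        have hSB : SB (PySem.List.pyGetD i st 0) ((j : Int) - st) (x :: r)
            = sc (PySem.List.pyGetD i st 0) ((j : Int) - st) + SB x 1 r := by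
          rw [SB, if_neg (by tauto)]
        rw [hih, hx, hSB, sc]
        split_ifs <;> ring

-- per-line equality of the two else-branches
lemma line_step_eq (i : List Int) (s : Int) :
    (if PySem.List.count i 1 < 2 ∧ PySem.List.count i (-1) < 2 then s
     else (aLoop i 1 0 []).foldl (fun s j => if j.2 ≥ 3 then s + j.1 * j.2 ^ 2 else s) s)
    = (if PySem.List.count i 1 < 2 ∧ PySem.List.count i (-1) < 2 then s
       else
        let n : Int := i.length
        let cuts : List Int := [0] ++ (PySem.List.pyRange 1 n 1).filter
            (fun k => PySem.List.pyGetD i k 0 ≠ PySem.List.pyGetD i (k-1) 0) ++ [n]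
        (cuts.zip (PySem.List.slice cuts (some 1) none)).foldl
          (fun s ab => if ab.2 - ab.1 ≥ 3 then s + PySem.List.pyGetD i ab.1 0 * (ab.2 - ab.1) ^ 2 else s) s) := by
  split_ifs with hg
  · rfl
  · simp only [PySem.List.slice_from_one]
    have hfp : ∀ (cs : List Int),
        List.foldl (fun s ab => if ab.2 - ab.1 ≥ 3 then s + PySem.List.pyGetD i ab.1 0 * (ab.2 - ab.1) ^ 2 else s)
          s (cs.zip cs.tail) = fp i cs s := fun _ => rfl
    rw [hfp]
    cases i with
    | nil =>
        rw [aLoop]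
        norm_num [PySem.List.pyRange_one_eq_nil, fp]
    | cons a rest =>
        have hb := cuts_bridge rest (a :: rest) 1 0 s le_rfl (by simp) rfl le_rfl
          (by norm_num) (by norm_num)
        norm_num [List.singleton_append, PySem.List.pyGetD_zero_cons] at hb ⊢
        rw [hb, aLoop_bridge rest (a :: rest) 1 0 [] le_rfl rfl, foldl_score_eq]
        simp only [List.nil_append, Nat.sub_self, List.getD_cons_zero]
        cases rest with
        | nil => simp [combosS, S, SB, sc, show ¬ (1:Int) ≥ 3 by omega]
        | cons b r' =>
            rw [S_combosS_eq_SB (b :: r') a 0 le_rfl (by simp)]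
            norm_num

lemma foldl_lines_eq (ls : List (List Int)) : ∀ (s : Int),
    ls.foldl (fun score i =>
      if PySem.List.count i 1 < 2 ∧ PySem.List.count i (-1) < 2 then score
      else
        let combos := aLoop i 1 0 []
        combos.foldl (fun s j => if j.2 ≥ 3 then s + j.1 * j.2 ^ 2 else s) score) s
    = ls.foldl (fun score row =>
      if PySem.List.count row 1 < 2 ∧ PySem.List.count row (-1) < 2 then score
      else
        let n : Int := row.length
        let cuts : List Int := [0] ++ (PySem.List.pyRange 1 n 1).filter
            (fun k => PySem.List.pyGetD row k 0 ≠ PySem.List.pyGetD row (k-1) 0) ++ [n]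
        (cuts.zip (PySem.List.slice cuts (some 1) none)).foldl
          (fun s ab => if ab.2 - ab.1 ≥ 3 then s + PySem.List.pyGetD row ab.1 0 * (ab.2 - ab.1) ^ 2 else s) score) s := by
  induction ls with
  | nil => intro s; rfl
  | cons i ls ih =>
      intro s
      simp only [List.foldl_cons]
      rw [show ((if PySem.List.count i 1 < 2 ∧ PySem.List.count i (-1) < 2 then s
        else
          let combos := aLoop i 1 0 []
          combos.foldl (fun s j => if j.2 ≥ 3 then s + j.1 * j.2 ^ 2 else s) s) : Int)
        = _ from line_step_eq i s, ih]

-- ===== VERDICT (by name: the statement is the Claim_ definition above) =====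
theorem get_line_score_spec : Claim_equal_get_line_score := by
  intro lines _
  unfold Spec_get_line_score get_line_score get_line_score_alt
  exact foldl_lines_eq lines 0
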